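-- pv_equiv track=rewrite | github.com/Sosohy/algorithm_study | 프로그래머스/1/389478. 택배 상자 꺼내기/택배 상자 꺼내기.py | solution
-- ===== SOURCE A (Python) =====
-- def solution(n, w, num):
--     answer = 0
--     x = 1
--     h = n//w+1
--     box = []
--
--     for j in range(h):
--         tmp = []
--         for i in range(w):
--             if(x <= n):
--                 tmp.append(x)
--                 x += 1
--             else:
--                 tmp.append(0)
--         if(j%2 == 0):
--             box.append(tmp)
--         else:
--             box.append(tmp[::-1])
--
--     for i in range(len(box)):
--         for j in range(len(box[0])):
--             if(box[i][j] == num):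
--                 idx = i
--                 while(idx < h and box[idx][j] != 0):
--                     answer += 1
--                     idx += 1
--
--     return answer
-- ===== SOURCE B (Python) =====
-- def solution(n, w, num):
--     # O(1): locate num's row/column arithmetically, then count the nonzero
--     # cells from that row downward in closed form (even and odd rows separately).
--     if w < 1 or num < 1 or num > n:
--         return 0
--     r, o = divmod(num - 1, w)
--     c = o if r % 2 == 0 else w - 1 - o
--     # even row k holds value k*w + c + 1 at column c; odd row k holds k*w + w - c
--     E = (n - c - 1) // w          # largest even-row index whose value fits (if even)
--     O = (n - w + c) // w          # largest odd-row index whose value fits (if odd)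
--     evens = max(0, E // 2 - (r - 1) // 2)      # even k in [r, E]
--     odds = max(0, (O + 1) // 2 - r // 2)       # odd  k in [r, O]
--     return evens + odds
-- ===== Notes on version B (the rewrite author's own statement) =====
-- stated objective: faster
-- what changed: B replaces the grid construction, full-grid scan and per-match column walk with O(1) arithmetic: row/column of num via divmod and a closed-form count of the even/odd rows below it whose value still fits.
import Mathlib
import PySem

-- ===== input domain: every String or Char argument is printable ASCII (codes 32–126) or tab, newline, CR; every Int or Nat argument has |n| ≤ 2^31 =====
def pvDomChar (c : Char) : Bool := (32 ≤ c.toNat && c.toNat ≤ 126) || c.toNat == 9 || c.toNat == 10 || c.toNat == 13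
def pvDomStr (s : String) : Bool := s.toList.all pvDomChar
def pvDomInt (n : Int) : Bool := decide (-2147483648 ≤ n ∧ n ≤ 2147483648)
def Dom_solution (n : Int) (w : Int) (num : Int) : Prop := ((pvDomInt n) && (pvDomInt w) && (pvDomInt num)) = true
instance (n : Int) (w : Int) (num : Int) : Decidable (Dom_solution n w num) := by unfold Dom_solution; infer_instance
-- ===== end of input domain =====

-- B replaces A's grid construction + full scan + column walk by O(1) arithmetic on n, w, num.

-- ===== PORT A =====
-- inner loop body: 'if x <= n: tmp.append(x); x += 1 else: tmp.append(0)'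
def pvInnerStep (n : Int) (st : List Int × Int) (_i : Int) : List Int × Int :=
  if st.2 ≤ n then (st.1 ++ [st.2], st.2 + 1) else (st.1 ++ [0], st.2)

-- outer loop body: build one row of width w, append it (reversed on odd rows: tmp[::-1])
def pvOuterStep (n : Int) (w : Int) (st : List (List Int) × Int) (j : Int) : List (List Int) × Int :=
  let t := (PySem.List.pyRange 0 w 1).foldl (pvInnerStep n) ([], st.2)
  if PySem.Int.mod j 2 = 0 then (st.1 ++ [t.1], t.2)
  else (st.1 ++ [(PySem.List.slice? t.1 none none (-1)).getD []], t.2)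

-- 'while idx < h and box[idx][j] != 0: answer += 1; idx += 1'  (indices in range when reached)
def pvWhile (box : List (List Int)) (h : Int) (col : Int) (idx : Int) (answer : Int) : Int :=
  if hg : idx < h ∧ (PySem.List.pyGet? ((PySem.List.pyGet? box idx).getD []) col).getD 0 ≠ 0 then
    pvWhile box h col (idx + 1) (answer + 1)
  else answer
termination_by (h - idx).toNat
decreasing_by omega

def solution (n : Int) (w : Int) (num : Int) : Int :=
  let h := PySem.Int.floordiv n w + 1
  let box := ((PySem.List.pyRange 0 h 1).foldl (pvOuterStep n w) ([], 1)).1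
  (PySem.List.pyRange 0 (box.length : Int) 1).foldl (fun answer i =>
    (PySem.List.pyRange 0 (((PySem.List.pyGet? box 0).getD []).length : Int) 1).foldl (fun answer j =>
      if (PySem.List.pyGet? ((PySem.List.pyGet? box i).getD []) j).getD 0 = num
      then pvWhile box h j i answer else answer) answer) 0

-- ===== PORT B =====
def solution_alt (n : Int) (w : Int) (num : Int) : Int :=
  if w < 1 ∨ num < 1 ∨ n < num then 0
  else
    let r := PySem.Int.floordiv (num - 1) w
    let o := PySem.Int.mod (num - 1) w
    let c := if PySem.Int.mod r 2 = 0 then o else w - 1 - o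
    let E := PySem.Int.floordiv (n - c - 1) w
    let O := PySem.Int.floordiv (n - w + c) w
    let evens := max 0 (PySem.Int.floordiv E 2 - PySem.Int.floordiv (r - 1) 2)
    let odds := max 0 (PySem.Int.floordiv (O + 1) 2 - PySem.Int.floordiv r 2)
    evens + odds

-- ===== PRECONDITION & SPEC =====
-- A raises ZeroDivisionError (n//w) exactly when w = 0; excluded.
def Pre_solution (n : Int) (w : Int) (num : Int) : Prop := w ≠ 0
instance (n : Int) (w : Int) (num : Int) : Decidable (Pre_solution n w num) := by unfold Pre_solution; infer_instance
def pvWitness_solution : Int × Int × Int := (6, 2, 3)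

def Spec_solution (n : Int) (w : Int) (num : Int) (out : Int) : Prop := out = solution_alt n w num
instance (n : Int) (w : Int) (num : Int) (out : Int) : Decidable (Spec_solution n w num out) := by unfold Spec_solution; infer_instance

-- ===== CLAIM (what is proved, stated in full; the proofs are below) =====
def Claim_equal_solution : Prop := ∀ (n : Int) (w : Int) (num : Int), Dom_solution n w num → Pre_solution n w num → Spec_solution n w num (solution n w num)

-- ===== LEMMAS AND PROOFS =====

-- value sitting at column c of row k of the (virtual) zigzag grid, before the "≤ n" cut
def pvCell (w c k : Int) : Int := k * w + (if k % 2 = 0 then c + 1 else w - c)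
-- the stored entry: the value if it fits, else 0
def pvEntry (n w c k : Int) : Int := if pvCell w c k ≤ n then pvCell w c k else 0
-- row j before the odd-row reversal
def pvRowPre (n w jv : Int) : List Int :=
  (List.range w.toNat).map (fun (i : Nat) => if jv * w + (i : Int) + 1 ≤ n then jv * w + (i : Int) + 1 else 0)
def pvRow (n w : Int) (j : Nat) : List Int :=
  if j % 2 = 0 then pvRowPre n w (j : Int) else (pvRowPre n w (j : Int)).reverse
-- closed-form count of nonzero entries in column c from row idx downward (= B's formula with r := idx)
def pvF (n w c idx : Int) : Int :=
  max 0 (PySem.Int.floordiv (PySem.Int.floordiv (n - c - 1) w) 2 - PySem.Int.floordiv (idx - 1) 2)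
  + max 0 (PySem.Int.floordiv (PySem.Int.floordiv (n - w + c) w + 1) 2 - PySem.Int.floordiv idx 2)

def pvFill (n b0 : Int) (m : Nat) : List Int :=
  (List.range m).map (fun (i : Nat) => if b0 + (i : Int) + 1 ≤ n then b0 + (i : Int) + 1 else 0)

theorem pv_inner_spec (n b0 : Int) (hn : 0 ≤ n) (hb : 0 ≤ b0) (l : List Int) :
    l.foldl (pvInnerStep n) ([], min (b0 + 1) (n + 1))
    = (pvFill n b0 l.length, min (b0 + (l.length : Int) + 1) (n + 1)) := by
  induction l using List.reverseRecOn with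
  | nil => simp [pvFill]
  | append_singleton l a ih =>
      rw [List.foldl_append, ih]
      simp only [List.foldl_cons, List.foldl_nil, pvInnerStep, List.length_append, List.length_cons,
        List.length_nil, pvFill, List.range_succ, List.map_append, List.map_cons, List.map_nil]
      by_cases hc : b0 + (l.length : Int) + 1 ≤ n
      · rw [if_pos (by omega), if_pos hc]
        refine congrArg₂ Prod.mk ?_ ?_
        · congr 2 <;> omega
        · push_cast; omega
      · rw [if_neg (by omega), if_neg hc]
        refine congrArg₂ Prod.mk ?_ ?_
        · congr 2 <;> omega
        · push_cast; omega

def pvBox (n w : Int) : List (List Int) :=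
  (List.range (PySem.Int.floordiv n w + 1).toNat).map (pvRow n w)

theorem pv_outer_spec (n w : Int) (hn : 0 ≤ n) (hw : 1 ≤ w) (m : Nat) :
    (((List.range m).map (fun (k : Nat) => ((0 : Int) + k))).foldl (pvOuterStep n w)
        ([], min 1 (n + 1)))
    = ((List.range m).map (pvRow n w), min ((m : Int) * w + 1) (n + 1)) := by
  induction m with
  | zero => simp
  | succ m ih =>
      rw [List.range_succ, List.map_append, List.foldl_append, ih]
      simp only [List.map_cons, List.map_nil, List.foldl_cons, List.foldl_nil]
      have hb0 : (0 : Int) ≤ (m : Int) * w := by positivity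
      have hmin : min ((m : Int) * w + 1) (n + 1) = min ((m : Int) * w + 1 - 1 + 1) (n + 1) := by
        norm_num
      have hinner := pv_inner_spec n ((m : Int) * w) hn hb0 (PySem.List.pyRange 0 w 1)
      have hlen : (PySem.List.pyRange 0 w 1).length = w.toNat := by
        rw [PySem.List.length_pyRange_one]; congr 1; omega
      rw [hlen] at hinner
      have hfill : pvFill n ((m : Int) * w) w.toNat = pvRowPre n w (m : Int) := rfl
      have hx : ((m : Int) * w + (w.toNat : Int) + 1) = ((m : Int) + 1) * w + 1 := by
        rw [Int.toNat_of_nonneg (by omega)]; ring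
      rw [hfill, hx] at hinner
      unfold pvOuterStep
      rw [hinner]
      by_cases hm : m % 2 = 0
      · rw [if_pos (by rw [PySem.Int.mod_eq_emod_of_pos (by norm_num : (0:Int) < 2)]; omega)]
        refine congrArg₂ Prod.mk ?_ ?_
        · rw [List.map_append, List.map_cons, List.map_nil]
          simp only []
          congr 2
          rw [pvRow, if_pos hm]
        · simp only []
          push_cast; ring_nf
      · rw [if_neg (by rw [PySem.Int.mod_eq_emod_of_pos (by norm_num : (0:Int) < 2)]; omega)]
        simp only [PySem.List.slice?_none_none_neg_one, Option.getD_some]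
        refine congrArg₂ Prod.mk ?_ ?_
        · rw [List.map_append, List.map_cons, List.map_nil]
          congr 2
          rw [pvRow, if_neg hm]
        · push_cast; ring_nf

theorem pv_box_eq (n w : Int) (hn : 0 ≤ n) (hw : 1 ≤ w) :
    ((PySem.List.pyRange 0 (PySem.Int.floordiv n w + 1) 1).foldl (pvOuterStep n w) ([], 1)).1
    = pvBox n w := by
  have h1 : (([] : List (List Int)), (1 : Int)) = (([] : List (List Int)), min 1 (n + 1)) := by
    rw [min_eq_left (by omega)]
  rw [PySem.List.pyRange_one, h1]
  have h2 : ((PySem.Int.floordiv n w + 1 - 0)).toNat = (PySem.Int.floordiv n w + 1).toNat := by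
    norm_num
  rw [h2, pv_outer_spec n w hn hw, pvBox]

theorem pv_entry_spec (n w : Int) (hw : 1 ≤ w) (j i : Nat) (hi : i < w.toNat) :
    (PySem.List.pyGet? (pvRow n w j) (i : Int)).getD 0 = pvEntry n w (i : Int) (j : Int) := by
  rw [pvRow, pvEntry, pvCell]
  by_cases hj : j % 2 = 0
  · rw [if_pos hj, if_pos (by omega : ((j : Int)) % 2 = 0), pvRowPre]
    rw [PySem.List.pyGet?_natCast, List.getElem?_map, List.getElem?_range hi]
    simp only [Option.map_some, Option.getD_some]
    have he : (j : Int) * w + (i : Int) + 1 = (j : Int) * w + ((i : Int) + 1) := by ring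
    rw [he]
  · rw [if_neg hj, if_neg (by omega : ¬ ((j : Int)) % 2 = 0), pvRowPre]
    rw [PySem.List.pyGet?_natCast,
      List.getElem?_reverse (by simpa using hi), List.length_map, List.length_range,
      List.getElem?_map, List.getElem?_range (by omega)]
    simp only [Option.map_some, Option.getD_some]
    have hc : ((w.toNat - 1 - i : Nat) : Int) = w - 1 - (i : Int) := by omega
    rw [hc]
    have he : (j : Int) * w + (w - 1 - (i : Int)) + 1 = (j : Int) * w + (w - (i : Int)) := by ring
    rw [he]

theorem pv_box_entry (n w : Int) (hw : 1 ≤ w) (idx c : Int) (h0 : 0 ≤ idx)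
    (hih : idx < PySem.Int.floordiv n w + 1) (hc0 : 0 ≤ c) (hcw : c < w) :
    (PySem.List.pyGet? ((PySem.List.pyGet? (pvBox n w) idx).getD []) c).getD 0
    = pvEntry n w c idx := by
  rw [pvBox, PySem.List.pyGet?_of_nonneg _ h0, List.getElem?_map,
    List.getElem?_range (by omega : idx.toNat < (PySem.Int.floordiv n w + 1).toNat)]
  simp only [Option.map_some, Option.getD_some]
  have he := pv_entry_spec n w hw idx.toNat c.toNat (by omega)
  rw [show ((c.toNat : Nat) : Int) = c from by omega,
    show ((idx.toNat : Nat) : Int) = idx from by omega] at he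
  exact he

theorem pv_while_acc (box : List (List Int)) (h col : Int) :
    ∀ (m : Nat) (idx a : Int), (h - idx).toNat = m →
      pvWhile box h col idx a = a + pvWhile box h col idx 0 := by
  intro m
  induction m with
  | zero =>
      intro idx a hm
      conv_lhs => rw [pvWhile]
      conv_rhs => rw [pvWhile]
      rw [dif_neg (by omega), dif_neg (by omega)]
      omega
  | succ m ih =>
      intro idx a hm
      conv_lhs => rw [pvWhile]
      conv_rhs => rw [pvWhile]
      by_cases hg : idx < h ∧
          (PySem.List.pyGet? ((PySem.List.pyGet? box idx).getD []) col).getD 0 ≠ 0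
      · rw [dif_pos hg, dif_pos hg, ih (idx + 1) (a + 1) (by omega),
          ih (idx + 1) (0 + 1) (by omega)]
        ring
      · rw [dif_neg hg, dif_neg hg]; omega

theorem pv_cell_big (n w c idx : Int) (hw : 1 ≤ w) (hc0 : 0 ≤ c) (hcw : c < w)
    (hidx : PySem.Int.floordiv n w + 1 ≤ idx) : ¬ pvCell w c idx ≤ n := by
  intro hle
  rw [pvCell] at hle
  have hs : 1 ≤ (if idx % 2 = 0 then c + 1 else w - c) := by split <;> omega
  have hmn : idx * w ≤ n := by linarith
  have h1 : idx ≤ PySem.Int.floordiv n w :=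
    (PySem.Int.le_floordiv_iff_mul_le (by omega)).mpr hmn
  omega

theorem pv_cell_small (n w c idx : Int) (hw : 1 ≤ w) (hc0 : 0 ≤ c) (hcw : c < w)
    (hle : pvCell w c idx ≤ n) : idx < PySem.Int.floordiv n w + 1 := by
  by_contra hcon
  exact pv_cell_big n w c idx hw hc0 hcw (by omega) hle

theorem pv_cell_pos (w c idx : Int) (hw : 1 ≤ w) (hc0 : 0 ≤ c) (hcw : c < w)
    (h0 : 0 ≤ idx) : 1 ≤ pvCell w c idx := by
  rw [pvCell]
  have hnn := mul_nonneg h0 (by omega : (0 : Int) ≤ w)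
  split <;> linarith

theorem pvF_step (n w c idx : Int) (hw : 1 ≤ w) (hc0 : 0 ≤ c) (hcw : c < w) (h0 : 0 ≤ idx)
    (hle : pvCell w c idx ≤ n) : pvF n w c idx = 1 + pvF n w c (idx + 1) := by
  have hwpos : (0 : Int) < w := by omega
  rw [pvCell] at hle
  rw [pvF, pvF]
  simp only [PySem.Int.floordiv_eq_ediv_of_pos (show (0 : Int) < 2 by norm_num)]
  by_cases hp : idx % 2 = 0
  · rw [if_pos hp] at hle
    have hE : idx ≤ PySem.Int.floordiv (n - c - 1) w :=
      (PySem.Int.le_floordiv_iff_mul_le hwpos).mpr (by linarith)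
    omega
  · rw [if_neg hp] at hle
    have hO : idx ≤ PySem.Int.floordiv (n - w + c) w :=
      (PySem.Int.le_floordiv_iff_mul_le hwpos).mpr (by linarith)
    omega

theorem pvF_zero (n w c idx : Int) (hw : 1 ≤ w) (hc0 : 0 ≤ c) (hcw : c < w) (h0 : 0 ≤ idx)
    (hgt : ¬ pvCell w c idx ≤ n) : pvF n w c idx = 0 := by
  have hwpos : (0 : Int) < w := by omega
  rw [pvCell] at hgt
  rw [pvF]
  simp only [PySem.Int.floordiv_eq_ediv_of_pos (show (0 : Int) < 2 by norm_num)]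
  by_cases hp : idx % 2 = 0
  · rw [if_pos hp] at hgt
    have hE : PySem.Int.floordiv (n - c - 1) w < idx :=
      (PySem.Int.floordiv_lt_iff_lt_mul hwpos).mpr (by linarith)
    have hO : PySem.Int.floordiv (n - w + c) w < idx + 1 :=
      (PySem.Int.floordiv_lt_iff_lt_mul hwpos).mpr (by
        have hx : (idx + 1) * w = idx * w + w := by ring
        rw [hx]; linarith)
    omega
  · rw [if_neg hp] at hgt
    have hO : PySem.Int.floordiv (n - w + c) w < idx :=
      (PySem.Int.floordiv_lt_iff_lt_mul hwpos).mpr (by linarith)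
    have hE : PySem.Int.floordiv (n - c - 1) w < idx + 1 :=
      (PySem.Int.floordiv_lt_iff_lt_mul hwpos).mpr (by
        have hx : (idx + 1) * w = idx * w + w := by ring
        rw [hx]; linarith)
    omega

theorem pv_count (n w c : Int) (hw : 1 ≤ w) (hc0 : 0 ≤ c) (hcw : c < w) :
    ∀ (m : Nat) (idx : Int), 0 ≤ idx → (PySem.Int.floordiv n w + 1 - idx).toNat = m →
      pvWhile (pvBox n w) (PySem.Int.floordiv n w + 1) c idx 0 = pvF n w c idx := by
  intro m
  induction m with
  | zero =>
      intro idx h0 hm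
      have hbig := pv_cell_big n w c idx hw hc0 hcw (by omega)
      conv_lhs => rw [pvWhile]
      rw [dif_neg (fun hand => absurd hand.1 (by omega))]
      exact (pvF_zero n w c idx hw hc0 hcw h0 hbig).symm
  | succ m ih =>
      intro idx h0 hm
      by_cases hle : pvCell w c idx ≤ n
      · have hsm := pv_cell_small n w c idx hw hc0 hcw hle
        have hpos := pv_cell_pos w c idx hw hc0 hcw h0
        conv_lhs => rw [pvWhile]
        rw [dif_pos ⟨hsm, by
          rw [pv_box_entry n w hw idx c h0 hsm hc0 hcw, pvEntry, if_pos hle]; omega⟩]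
        rw [pv_while_acc (pvBox n w) (PySem.Int.floordiv n w + 1) c m (idx + 1) (0 + 1)
          (by omega)]
        rw [ih (idx + 1) (by omega) (by omega)]
        rw [pvF_step n w c idx hw hc0 hcw h0 hle]
        ring
      · conv_lhs => rw [pvWhile]
        by_cases hi : idx < PySem.Int.floordiv n w + 1
        · rw [dif_neg (fun hand => hand.2 (by
            rw [pv_box_entry n w hw idx c h0 hi hc0 hcw, pvEntry, if_neg hle]))]
          exact (pvF_zero n w c idx hw hc0 hcw h0 hle).symm
        · rw [dif_neg (fun hand => hi hand.1)]
          exact (pvF_zero n w c idx hw hc0 hcw h0 hle).symm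

theorem pv_sum_single (v : Int) (f : Nat → Int) (m k0 : Nat)
    (hf : ∀ k, k < m → f k = if k = k0 then v else 0) :
    ((List.range m).map f).sum = if k0 < m then v else 0 := by
  induction m with
  | zero => simp
  | succ m ih =>
      rw [List.range_succ, List.map_append, List.sum_append,
        ih (fun k hk => hf k (by omega))]
      simp only [List.map_cons, List.map_nil, List.sum_cons, List.sum_nil]
      rw [hf m (by omega)]
      split_ifs <;> omega

theorem pv_foldl_id {α : Type} (l : List α) (a : Int) :
    l.foldl (fun acc _ => acc) a = a := by
  induction l generalizing a with
  | nil => rfl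
  | cons x xs ih => simpa using ih a

theorem pv_scan (n w num : Int) (hw : 1 ≤ w) (hn : 0 ≤ n) :
    solution n w num
    = ((List.range (PySem.Int.floordiv n w + 1).toNat).map (fun (iR : Nat) =>
        ((List.range w.toNat).map (fun (jC : Nat) =>
          if pvEntry n w (jC : Int) (iR : Int) = num
          then pvWhile (pvBox n w) (PySem.Int.floordiv n w + 1) (jC : Int) (iR : Int) 0
          else 0)).sum)).sum := by
  have hh0 : 0 ≤ PySem.Int.floordiv n w :=
    (PySem.Int.le_floordiv_iff_mul_le (by omega)).mpr (by rw [zero_mul]; exact hn)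
  simp only [solution]
  rw [pv_box_eq n w hn hw]
  have hlen : (pvBox n w).length = (PySem.Int.floordiv n w + 1).toNat := by
    rw [pvBox, List.length_map, List.length_range]
  have hrow0 : ((PySem.List.pyGet? (pvBox n w) 0).getD []) = pvRow n w 0 := by
    rw [pvBox, PySem.List.pyGet?_zero, List.getElem?_map,
      List.getElem?_range (by omega : 0 < (PySem.Int.floordiv n w + 1).toNat)]
    rfl
  have hlen0 : (pvRow n w 0).length = w.toNat := by
    rw [pvRow, if_pos (by norm_num), pvRowPre, List.length_map, List.length_range]
  rw [hrow0, hlen0, hlen]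
  rw [PySem.List.pyRange_one 0 (((PySem.Int.floordiv n w + 1).toNat : Nat) : Int),
    PySem.List.pyRange_one 0 ((w.toNat : Nat) : Int)]
  rw [show ((((PySem.Int.floordiv n w + 1).toNat : Nat) : Int) - 0).toNat
      = (PySem.Int.floordiv n w + 1).toNat from by omega,
    show (((w.toNat : Nat) : Int) - 0).toNat = w.toNat from by omega]
  rw [List.foldl_map]
  rw [PySem.List.foldl_congr_mem' _ _
    (fun (answer : Int) (iR : Nat) => answer +
        ((List.range w.toNat).map (fun (jC : Nat) =>
          if pvEntry n w (jC : Int) (iR : Int) = num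
          then pvWhile (pvBox n w) (PySem.Int.floordiv n w + 1) (jC : Int) (iR : Int) 0
          else 0)).sum) _ ?_]
  · rw [PySem.List.foldl_add]
    norm_num
  · intro iR hiR answer
    rw [List.mem_range] at hiR
    rw [List.foldl_map]
    rw [PySem.List.foldl_congr_mem' _ _
      (fun (acc : Int) (jC : Nat) => acc +
          (if pvEntry n w (jC : Int) (iR : Int) = num
           then pvWhile (pvBox n w) (PySem.Int.floordiv n w + 1) (jC : Int) (iR : Int) 0
           else 0)) _ ?_]
    · rw [PySem.List.foldl_add]
    · intro jC hjC acc
      rw [List.mem_range] at hjC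
      simp only [zero_add]
      rw [pv_box_entry n w hw (iR : Int) (jC : Int) (by omega) (by omega) (by omega) (by omega)]
      by_cases he : pvEntry n w (jC : Int) (iR : Int) = num
      · rw [if_pos he, if_pos he,
          pv_while_acc (pvBox n w) (PySem.Int.floordiv n w + 1) (jC : Int)
            ((PySem.Int.floordiv n w + 1 - iR).toNat) (iR : Int) acc rfl]
      · rw [if_neg he, if_neg he]
        omega

-- B's row index and column index of num (defined exactly as in solution_alt)
def pvRr (w num : Int) : Int := PySem.Int.floordiv (num - 1) w
def pvCc (w num : Int) : Int :=
  if PySem.Int.mod (pvRr w num) 2 = 0 then PySem.Int.mod (num - 1) w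
  else w - 1 - PySem.Int.mod (num - 1) w

theorem pv_rc_facts (w num : Int) (hw : 1 ≤ w) (h1 : 1 ≤ num) :
    0 ≤ pvRr w num ∧ 0 ≤ pvCc w num ∧ pvCc w num < w ∧
      pvCell w (pvCc w num) (pvRr w num) = num := by
  have hwpos : (0 : Int) < w := by omega
  have ho1 := PySem.Int.mod_nonneg (num - 1) hwpos
  have ho2 := PySem.Int.mod_lt (num - 1) hwpos
  have hid := PySem.Int.floordiv_mul_add_mod (num - 1) w
  have hr0 : 0 ≤ pvRr w num :=
    (PySem.Int.le_floordiv_iff_mul_le hwpos).mpr (by rw [zero_mul]; omega)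
  have hmod2 : PySem.Int.mod (pvRr w num) 2 = (pvRr w num) % 2 :=
    PySem.Int.mod_eq_emod_of_pos (by norm_num)
  refine ⟨hr0, ?_, ?_, ?_⟩
  · rw [pvCc]; split <;> omega
  · rw [pvCc]; split <;> omega
  · rw [pvCell, pvCc, hmod2, pvRr] at *
    by_cases hp : PySem.Int.floordiv (num - 1) w % 2 = 0
    · rw [if_pos hp, if_pos hp]; linarith
    · rw [if_neg hp, if_neg hp]; linarith

theorem pv_entry_eq_iff (n w num : Int) (hw : 1 ≤ w) (h1 : 1 ≤ num) (h2 : num ≤ n)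
    (iR jC : Nat) (hj : jC < w.toNat) :
    pvEntry n w (jC : Int) (iR : Int) = num ↔
      ((iR : Int) = pvRr w num ∧ (jC : Int) = pvCc w num) := by
  obtain ⟨hr0, hc0, hcw, hcell⟩ := pv_rc_facts w num hw h1
  constructor
  · intro he
    rw [pvEntry] at he
    have hle : pvCell w (jC : Int) (iR : Int) ≤ n := by
      by_contra hco; rw [if_neg hco] at he; omega
    rw [if_pos hle] at he
    rw [pvCell] at he
    have hcell' := hcell
    rw [pvCell] at hcell'
    have hs1a : 1 ≤ (if (iR : Int) % 2 = 0 then (jC : Int) + 1 else w - (jC : Int)) := by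
      split <;> omega
    have hs1b : (if (iR : Int) % 2 = 0 then (jC : Int) + 1 else w - (jC : Int)) ≤ w := by
      split <;> omega
    have hs2a : 1 ≤ (if pvRr w num % 2 = 0 then pvCc w num + 1 else w - pvCc w num) := by
      split <;> omega
    have hs2b : (if pvRr w num % 2 = 0 then pvCc w num + 1 else w - pvCc w num) ≤ w := by
      split <;> omega
    have hlt1 : (iR : Int) * w < (pvRr w num + 1) * w := by
      have hx : (pvRr w num + 1) * w = pvRr w num * w + w := by ring
      rw [hx]; linarith
    have hlt2 : pvRr w num * w < ((iR : Int) + 1) * w := by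
      have hx : ((iR : Int) + 1) * w = (iR : Int) * w + w := by ring
      rw [hx]; linarith
    have e1 : (iR : Int) < pvRr w num + 1 := lt_of_mul_lt_mul_right hlt1 (by omega)
    have e2 : pvRr w num < (iR : Int) + 1 := lt_of_mul_lt_mul_right hlt2 (by omega)
    have hreq : (iR : Int) = pvRr w num := by omega
    refine ⟨hreq, ?_⟩
    rw [hreq] at he
    have hs : (if pvRr w num % 2 = 0 then (jC : Int) + 1 else w - (jC : Int))
        = (if pvRr w num % 2 = 0 then pvCc w num + 1 else w - pvCc w num) := by
      linarith
    split_ifs at hs <;> omega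
  · rintro ⟨hi, hj2⟩
    rw [pvEntry, hi, hj2, hcell, if_pos h2]

theorem pv_alt_main (n w num : Int) (hw1 : 1 ≤ w) (h1 : 1 ≤ num) (h2 : num ≤ n) :
    solution_alt n w num = pvF n w (pvCc w num) (pvRr w num) := by
  rw [solution_alt, if_neg (by omega : ¬ (w < 1 ∨ num < 1 ∨ n < num))]
  rfl

theorem pv_box_neg (n w : Int) (hw : w ≤ -1) (l : List Int) (st : List (List Int) × Int) :
    (l.foldl (pvOuterStep n w) st).1 = st.1 ++ l.map (fun _ => ([] : List Int)) := by
  induction l generalizing st with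
  | nil => simp
  | cons x xs ih =>
      rw [List.foldl_cons, ih]
      simp only [pvOuterStep, PySem.List.pyRange_one_eq_nil (show w ≤ 0 by omega),
        List.foldl_nil, PySem.List.slice?_none_none_neg_one, List.reverse_nil,
        Option.getD_some, List.map_cons]
      split <;> simp

theorem pv_get0_nil (l : List Int) :
    ((PySem.List.pyGet? (l.map (fun _ => ([] : List Int))) 0).getD []) = [] := by
  cases l with
  | nil => rfl
  | cons x xs => rw [List.map_cons, PySem.List.pyGet?_zero_cons, Option.getD_some]

-- ===== VERDICT (by name: the statement is the Claim_ definition above) =====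
theorem solution_spec : Claim_equal_solution := by
  unfold Claim_equal_solution
  intro n w num _ hpre
  unfold Spec_solution
  rcases lt_or_ge w 1 with hwlt | hw1
  · have hwneg : w ≤ -1 := by unfold Pre_solution at hpre; omega
    simp only [solution]
    rw [pv_box_neg n w hwneg _ ([], 1)]
    simp only [List.nil_append]
    rw [pv_get0_nil]
    rw [PySem.List.pyRange_one_eq_nil (show ((([] : List Int).length : Nat) : Int) ≤ 0 by simp)]
    simp only [List.foldl_nil]
    rw [pv_foldl_id]
    rw [solution_alt, if_pos (by omega)]
  · rcases lt_or_ge n 0 with hnneg | hn0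
    · simp only [solution]
      have hfd : PySem.Int.floordiv n w < 0 :=
        (PySem.Int.floordiv_lt_iff_lt_mul (by omega)).mpr (by rw [zero_mul]; omega)
      rw [PySem.List.pyRange_one_eq_nil (show PySem.Int.floordiv n w + 1 ≤ 0 by omega)]
      simp only [List.foldl_nil]
      rw [PySem.List.pyRange_one_eq_nil
        (show (((([] : List (List Int)), (1 : Int)).1.length : Nat) : Int) ≤ 0 by simp)]
      simp only [List.foldl_nil]
      rw [solution_alt, if_pos (by omega)]
    · rw [pv_scan n w num hw1 hn0]
      by_cases hmain : 1 ≤ num ∧ num ≤ n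
      · obtain ⟨hnum1, hnum2⟩ := hmain
        obtain ⟨hr0, hc0, hcw, hcell⟩ := pv_rc_facts w num hw1 hnum1
        have hrh : pvRr w num < PySem.Int.floordiv n w + 1 :=
          pv_cell_small n w (pvCc w num) (pvRr w num) hw1 hc0 hcw (by rw [hcell]; exact hnum2)
        have hinner : ∀ iR : Nat, iR < (PySem.Int.floordiv n w + 1).toNat →
            ((List.range w.toNat).map (fun (jC : Nat) =>
              if pvEntry n w (jC : Int) (iR : Int) = num
              then pvWhile (pvBox n w) (PySem.Int.floordiv n w + 1) (jC : Int) (iR : Int) 0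
              else 0)).sum
            = if iR = (pvRr w num).toNat
              then pvWhile (pvBox n w) (PySem.Int.floordiv n w + 1) (pvCc w num) (pvRr w num) 0
              else 0 := by
          intro iR hiR
          rw [pv_sum_single
            (if iR = (pvRr w num).toNat
             then pvWhile (pvBox n w) (PySem.Int.floordiv n w + 1) (pvCc w num) (pvRr w num) 0
             else 0) _ w.toNat (pvCc w num).toNat ?_]
          · rw [if_pos (by omega)]
          · intro jC hjC
            by_cases he : pvEntry n w (jC : Int) (iR : Int) = num
            · rw [if_pos he]
              obtain ⟨hieq, hjeq⟩ :=
                (pv_entry_eq_iff n w num hw1 hnum1 hnum2 iR jC hjC).mp he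
              rw [if_pos (by omega), if_pos (by omega), hjeq, hieq]
            · rw [if_neg he]
              by_cases hj2 : jC = (pvCc w num).toNat
              · rw [if_pos hj2]
                by_cases hi2 : iR = (pvRr w num).toNat
                · exact absurd ((pv_entry_eq_iff n w num hw1 hnum1 hnum2 iR jC hjC).mpr
                    ⟨by omega, by omega⟩) he
                · rw [if_neg hi2]
              · rw [if_neg hj2]
        rw [List.map_congr_left (fun iR hiR => hinner iR (List.mem_range.mp hiR))]
        rw [pv_sum_single
          (pvWhile (pvBox n w) (PySem.Int.floordiv n w + 1) (pvCc w num) (pvRr w num) 0) _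
          (PySem.Int.floordiv n w + 1).toNat (pvRr w num).toNat (fun k hk => rfl)]
        rw [if_pos (by omega)]
        rw [pv_count n w (pvCc w num) hw1 hc0 hcw
          ((PySem.Int.floordiv n w + 1 - pvRr w num).toNat) (pvRr w num) hr0 rfl]
        rw [pv_alt_main n w num hw1 hnum1 hnum2]
      · rw [solution_alt, if_pos (by omega)]
        apply List.sum_eq_zero
        intro x hx
        rw [List.mem_map] at hx
        obtain ⟨iR, hiR, rfl⟩ := hx
        apply List.sum_eq_zero
        intro y hy
        rw [List.mem_map] at hy
        obtain ⟨jC, hjC, rfl⟩ := hy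
        rw [List.mem_range] at hiR
        rw [List.mem_range] at hjC
        by_cases he : pvEntry n w (jC : Int) (iR : Int) = num
        · rw [if_pos he]
          rw [pvEntry] at he
          by_cases hle : pvCell w (jC : Int) (iR : Int) ≤ n
          · rw [if_pos hle] at he
            have hpos := pv_cell_pos w (jC : Int) (iR : Int) hw1 (by omega) (by omega) (by omega)
            omega
          · rw [if_neg hle] at he
            conv_lhs => rw [pvWhile]
            rw [dif_neg (fun hand => hand.2 (by
              rw [pv_box_entry n w hw1 (iR : Int) (jC : Int) (by omega) (by omega) (by omega)
                (by omega), pvEntry, if_neg hle]))]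
        · rw [if_neg he]
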